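-- pv_equiv track=rewrite | github.com/Reonyo/Gemastik-Data-Mining | src/agents/editor.py | _format_section_headers
-- ===== SOURCE A (Python) =====
-- def _format_section_headers(document: str) -> str:
--     """
--     Format section headers consistently.
--
--     Args:
--         document: Document text
--
--     Returns:
--         Document with formatted headers
--     """
--     headers = [
--         "EXECUTIVE SUMMARY",
--         "FACTS AND BACKGROUND",
--         "LEGAL ISSUES",
--         "ANALYSIS AND REASONING",
--         "CONCLUSIONS AND RECOMMENDATIONS",
--         "ADDITIONAL CONSIDERATIONS"
--     ]
--
--     for header in headers:
--         # Ensure headers are properly formatted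
--         document = document.replace(header + ":", f"\n{header}:\n")
--         document = document.replace(header.lower() + ":", f"\n{header}:\n")
--         document = document.replace(header.title() + ":", f"\n{header}:\n")
--
--     return document
-- ===== SOURCE B (Python) =====
-- def _format_section_headers(document: str) -> str:
--     headers = [
--         "EXECUTIVE SUMMARY",
--         "FACTS AND BACKGROUND",
--         "LEGAL ISSUES",
--         "ANALYSIS AND REASONING",
--         "CONCLUSIONS AND RECOMMENDATIONS",
--         "ADDITIONAL CONSIDERATIONS",
--     ]
--     # One table of all 18 case variants, then a single left-to-right scan.
--     table = []
--     for h in headers: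
--         repl = "\n" + h + ":\n"
--         for v in (h, h.lower(), h.title()):
--             table.append((v + ":", repl))
--     out = []
--     i = 0
--     n = len(document)
--     while i < n:
--         for pat, repl in table:
--             if document.startswith(pat, i):
--                 out.append(repl)
--                 i += len(pat)
--                 break
--         else:
--             out.append(document[i])
--             i += 1
--     return "".join(out)
-- ===== Notes on version B (the rewrite author's own statement) =====
-- stated objective: alternative
-- what changed: A runs 18 sequential full-document str.replace passes (one per header case-variant); B builds one table of the 18 (variant, replacement) pairs and produces the output in a single left-to-right scan that at each position tries the table and either emits a replacement (skipping the variant) or copies one character.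
import Mathlib
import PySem

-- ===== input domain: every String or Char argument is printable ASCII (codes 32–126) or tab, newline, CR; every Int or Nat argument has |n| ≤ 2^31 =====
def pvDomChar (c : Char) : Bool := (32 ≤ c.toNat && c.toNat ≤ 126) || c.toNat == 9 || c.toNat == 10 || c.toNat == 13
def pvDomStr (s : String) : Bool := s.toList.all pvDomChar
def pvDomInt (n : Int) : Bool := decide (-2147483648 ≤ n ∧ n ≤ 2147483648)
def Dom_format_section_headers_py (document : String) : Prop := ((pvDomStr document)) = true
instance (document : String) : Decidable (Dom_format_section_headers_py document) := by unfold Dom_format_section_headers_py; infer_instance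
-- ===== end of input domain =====

-- B replaces A's 18 sequential full-document `str.replace` passes by one table of the
-- 18 (variant, replacement) pairs and a single left-to-right scan; alternative algorithm, same result.

-- ===== PORT A =====
-- hand port of Python str.title(): uppercase a letter after a non-letter, lowercase otherwise
-- (exact on the ASCII strings it is applied to here)
def pvTitleGo : Bool → List Char → List Char
  | _, [] => []
  | prev, c :: t =>
    (if PySem.Chars.isalpha c then (if prev then PySem.Chars.lowerChar c else PySem.Chars.upperChar c) else c)
      :: pvTitleGo (PySem.Chars.isalpha c) t

def pvTitleChars (s : List Char) : List Char := pvTitleGo false s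

def pvHeaders : List (List Char) :=
  ["EXECUTIVE SUMMARY".toList,
   "FACTS AND BACKGROUND".toList,
   "LEGAL ISSUES".toList,
   "ANALYSIS AND REASONING".toList,
   "CONCLUSIONS AND RECOMMENDATIONS".toList,
   "ADDITIONAL CONSIDERATIONS".toList]

-- A: for each header, three full-document replaces (upper, lower, title variant), Python order.
-- (PySem.Str.replace is String.ofList ∘ PySem.Chars.replace ∘ toList; the port works on the char list once.)
def format_section_headers_py (document : String) : String :=
  String.ofList <|
    pvHeaders.foldl (fun doc h =>
      let doc := PySem.Chars.replace doc (h ++ [':']) ('\n' :: (h ++ [':', '\n']))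
      let doc := PySem.Chars.replace doc (PySem.Chars.lower h ++ [':']) ('\n' :: (h ++ [':', '\n']))
      PySem.Chars.replace doc (pvTitleChars h ++ [':']) ('\n' :: (h ++ [':', '\n']))) document.toList

-- ===== PORT B =====
-- B: the table of all 18 (variant ++ ":", replacement) pairs, built once
def pvTable : List (List Char × List Char) :=
  pvHeaders.foldl (fun tbl h =>
    tbl ++ [(h ++ [':'], '\n' :: (h ++ [':', '\n'])),
            (PySem.Chars.lower h ++ [':'], '\n' :: (h ++ [':', '\n'])),
            (pvTitleChars h ++ [':'], '\n' :: (h ++ [':', '\n']))]) []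

-- B's while-loop over the document, fuel = number of remaining characters (each step consumes ≥ 1)
def pvScan (tbl : List (List Char × List Char)) : Nat → List Char → List Char
  | 0, l => l
  | _ + 1, [] => []
  | fuel + 1, c :: t =>
    match tbl.find? (fun pr => pr.1.isPrefixOf (c :: t)) with
    | some pr => pr.2 ++ pvScan tbl fuel ((c :: t).drop pr.1.length)
    | none => c :: pvScan tbl fuel t

def format_section_headers_py_alt (document : String) : String :=
  String.ofList (pvScan pvTable document.toList.length document.toList)

-- ===== PRECONDITION & SPEC =====
def Spec_format_section_headers_py (document : String) (out : String) : Prop := out = format_section_headers_py_alt document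
instance (document : String) (out : String) : Decidable (Spec_format_section_headers_py document out) := by unfold Spec_format_section_headers_py; infer_instance

-- ===== CLAIM (what is proved, stated in full; the proofs are below) =====
def Claim_equal_format_section_headers_py : Prop := ∀ (document : String), Dom_format_section_headers_py document → Spec_format_section_headers_py document (format_section_headers_py document)

-- ===== LEMMAS AND PROOFS =====

-- fuel-based form of PySem.Chars.replace.go without the reversed accumulator
def pvRepF (old new : List Char) : Nat → List Char → List Char
  | 0, l => l
  | _ + 1, [] => []
  | fuel + 1, c :: t =>
    if old.isPrefixOf (c :: t) then new ++ pvRepF old new fuel ((c :: t).drop old.length)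
    else c :: pvRepF old new fuel t

def pvRep (old new l : List Char) : List Char := pvRepF old new l.length l

def pvMulti (tbl : List (List Char × List Char)) (l : List Char) : List Char := pvScan tbl l.length l

def seqRep (steps : List (List Char × List Char)) (l : List Char) : List Char :=
  steps.foldl (fun l pr => pvRep pr.1 pr.2 l) l

def okTbl (tbl : List (List Char × List Char)) : Bool := tbl.all (fun pr => !pr.1.isEmpty)

-- the non-interference conditions letting one more replace fuse into the table
def okStep (tbl : List (List Char × List Char)) (p : List Char) : Bool :=
  !p.isEmpty &&
  tbl.all (fun qr =>
    ((List.range qr.2.length).all fun j =>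
      !(p.isPrefixOf (qr.2.drop j)) && !((qr.2.drop j).isPrefixOf p)) &&
    ((List.range p.length).all fun i =>
      decide (i = 0) || (!(qr.1.isPrefixOf (p.drop i)) && !((p.drop i).isPrefixOf qr.1))) &&
    ((List.range p.length).all fun i =>
      !((p.drop i).isPrefixOf qr.2) && !(qr.2.isPrefixOf (p.drop i))))

def okAllFrom : List (List Char × List Char) → List (List Char × List Char) → Bool
  | _, [] => true
  | tbl, pr :: rest => okStep tbl pr.1 && okAllFrom (tbl ++ [pr]) rest

theorem pv_go_eq (old new : List Char) : ∀ (fuel : Nat) (l acc : List Char),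
    PySem.Chars.replace.go old new fuel l acc = acc.reverse ++ pvRepF old new fuel l := by
  intro fuel
  induction fuel with
  | zero => intro l acc; cases l <;> simp [PySem.Chars.replace.go, pvRepF]
  | succ f ih =>
    intro l acc
    cases l with
    | nil => simp [PySem.Chars.replace.go, pvRepF]
    | cons c t =>
      rw [PySem.Chars.replace.go]
      by_cases h : old.isPrefixOf (c :: t)
      · simp [h, pvRepF, ih]
      · simp [h, pvRepF, ih]

theorem pv_replace_eq (old new l : List Char) (h : old ≠ []) :
    PySem.Chars.replace l old new = pvRep old new l := by
  simp [PySem.Chars.replace, List.isEmpty_iff, h, pv_go_eq, pvRep]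

theorem pvRepF_congr (old new : List Char) (h : old ≠ []) :
    ∀ (f1 : Nat) (l : List Char) (f2 : Nat), l.length ≤ f1 → l.length ≤ f2 →
      pvRepF old new f1 l = pvRepF old new f2 l := by
  intro f1
  induction f1 with
  | zero =>
    intro l f2 h1 _
    have : l = [] := List.eq_nil_of_length_eq_zero (Nat.le_zero.mp h1)
    subst this
    cases f2 <;> rfl
  | succ f ih =>
    intro l f2 h1 h2
    cases l with
    | nil => cases f2 <;> rfl
    | cons c t =>
      cases f2 with
      | zero => simp at h2
      | succ g =>
        simp only [pvRepF]
        by_cases hp : old.isPrefixOf (c :: t)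
        · have hlen : ((c :: t).drop old.length).length ≤ t.length := by
            have : 1 ≤ old.length := by
              cases old with
              | nil => exact absurd rfl h
              | cons _ _ => simp
            simp [List.length_drop]; omega
          rw [hp]
          simp only [if_true]
          rw [ih ((c :: t).drop old.length) g (by simp at h1; omega) (by simp at h2; omega)]
        · simp only [hp, Bool.false_eq_true, if_false]
          rw [ih t g (by simp at h1; omega) (by simp at h2; omega)]

theorem pvRep_cons (old new : List Char) (h : old ≠ []) (c : Char) (t : List Char) :
    pvRep old new (c :: t) =
      if old.isPrefixOf (c :: t) then new ++ pvRep old new ((c :: t).drop old.length)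
      else c :: pvRep old new t := by
  have h1 : 1 ≤ old.length := by
    cases old with
    | nil => exact absurd rfl h
    | cons _ _ => simp
  show pvRepF old new (t.length + 1) (c :: t) = _
  simp only [pvRepF]
  by_cases hp : old.isPrefixOf (c :: t)
  · simp only [hp, if_true]
    congr 1
    exact pvRepF_congr old new h t.length ((c :: t).drop old.length) ((c :: t).drop old.length).length
      (by simp [List.length_drop]; omega) le_rfl
  · simp [hp, pvRep]

theorem okTbl_ne {tbl : List (List Char × List Char)} (hok : okTbl tbl = true)
    {pr : List Char × List Char} (hm : pr ∈ tbl) : pr.1 ≠ [] := by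
  simp only [okTbl, List.all_eq_true] at hok
  simpa [List.isEmpty_iff] using hok pr hm

theorem pvScan_congr (tbl : List (List Char × List Char)) (hok : okTbl tbl = true) :
    ∀ (f1 : Nat) (l : List Char) (f2 : Nat), l.length ≤ f1 → l.length ≤ f2 →
      pvScan tbl f1 l = pvScan tbl f2 l := by
  intro f1
  induction f1 with
  | zero =>
    intro l f2 h1 _
    have : l = [] := List.eq_nil_of_length_eq_zero (Nat.le_zero.mp h1)
    subst this
    cases f2 <;> rfl
  | succ f ih =>
    intro l f2 h1 h2
    cases l with
    | nil => cases f2 <;> rfl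
    | cons c t =>
      cases f2 with
      | zero => simp at h2
      | succ g =>
        simp only [pvScan]
        cases hf : tbl.find? (fun pr => pr.1.isPrefixOf (c :: t)) with
        | none =>
          rw [ih t g (by simp at h1; omega) (by simp at h2; omega)]
        | some pr =>
          have hne : pr.1 ≠ [] := okTbl_ne hok (List.mem_of_find?_eq_some hf)
          have hlen1 : 1 ≤ pr.1.length := by
            cases hpr : pr.1 with
            | nil => exact absurd hpr hne
            | cons _ _ => simp
          show pr.2 ++ pvScan tbl f ((c :: t).drop pr.1.length)
              = pr.2 ++ pvScan tbl g ((c :: t).drop pr.1.length)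
          rw [ih ((c :: t).drop pr.1.length) g (by simp [List.length_drop] at *; omega)
            (by simp [List.length_drop] at *; omega)]

theorem pvMulti_cons_some {tbl : List (List Char × List Char)} (hok : okTbl tbl = true)
    {c : Char} {t : List Char} {pr : List Char × List Char}
    (hf : tbl.find? (fun pr => pr.1.isPrefixOf (c :: t)) = some pr) :
    pvMulti tbl (c :: t) = pr.2 ++ pvMulti tbl ((c :: t).drop pr.1.length) := by
  show pvScan tbl (t.length + 1) (c :: t) = _
  simp only [pvScan, hf]
  congr 1
  have hne : pr.1 ≠ [] := okTbl_ne hok (List.mem_of_find?_eq_some hf)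
  have hlen1 : 1 ≤ pr.1.length := by
    cases hpr : pr.1 with
    | nil => exact absurd hpr hne
    | cons _ _ => simp
  exact pvScan_congr tbl hok t.length ((c :: t).drop pr.1.length) ((c :: t).drop pr.1.length).length
    (by simp [List.length_drop]; omega) le_rfl

theorem pvMulti_cons_none {tbl : List (List Char × List Char)}
    {c : Char} {t : List Char}
    (hf : tbl.find? (fun pr => pr.1.isPrefixOf (c :: t)) = none) :
    pvMulti tbl (c :: t) = c :: pvMulti tbl t := by
  show pvScan tbl (t.length + 1) (c :: t) = _
  simp only [pvScan, hf]
  rfl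

theorem pvMulti_nil_tbl : ∀ l : List Char, pvMulti [] l = l := by
  intro l
  induction l with
  | nil => rfl
  | cons c t ih =>
    rw [pvMulti_cons_none (by simp)]
    rw [ih]

theorem pv_prefix_append_cases {p u v : List Char} (h : p <+: u ++ v) : p <+: u ∨ u <+: p := by
  rcases le_or_gt p.length u.length with hle | hlt
  · exact Or.inl (List.prefix_of_prefix_length_le h (List.prefix_append u v) hle)
  · exact Or.inr (List.prefix_of_prefix_length_le (List.prefix_append u v) h hlt.le)

theorem pvRep_append (p r : List Char) (hp : p ≠ []) :
    ∀ u v : List Char, (∀ j < u.length, ¬ p <+: (u.drop j ++ v)) →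
      pvRep p r (u ++ v) = u ++ pvRep p r v := by
  intro u
  induction u with
  | nil => intro v _; simp
  | cons c u' ih =>
    intro v hnm
    have h0 : ¬ p <+: (c :: u') ++ v := by simpa using hnm 0 (by simp)
    rw [List.cons_append, pvRep_cons p r hp,
      if_neg (by rw [List.isPrefixOf_iff_prefix]; simpa using h0)]
    rw [ih v (fun j hj => by simpa using hnm (j + 1) (by simp; omega))]
    simp

theorem pvMulti_append (tbl : List (List Char × List Char)) :
    ∀ u v : List Char, (∀ j < u.length, ∀ pr ∈ tbl, ¬ pr.1 <+: (u.drop j ++ v)) →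
      pvMulti tbl (u ++ v) = u ++ pvMulti tbl v := by
  intro u
  induction u with
  | nil => intro v _; simp
  | cons c u' ih =>
    intro v hnm
    have hf : tbl.find? (fun pr => pr.1.isPrefixOf (c :: (u' ++ v))) = none := by
      rw [List.find?_eq_none]
      intro pr hpr
      have := hnm 0 (by simp) pr hpr
      simp only [List.drop_zero] at this
      simp [List.isPrefixOf_iff_prefix]
      exact this
    rw [List.cons_append, pvMulti_cons_none hf,
      ih v (fun j hj pr hpr => by simpa using hnm (j + 1) (by simp; omega) pr hpr)]
    simp

theorem pv_no_new (tbl : List (List Char × List Char)) (p : List Char) (hok : okTbl tbl = true)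
    (H : ∀ pr ∈ tbl, ∀ i < p.length, ¬(p.drop i <+: pr.2) ∧ ¬(pr.2 <+: p.drop i)) :
    ∀ (n : Nat) (l : List Char), l.length ≤ n → ∀ i < p.length,
      ¬(p.drop i <+: l) → ¬(p.drop i <+: pvMulti tbl l) := by
  intro n
  induction n with
  | zero =>
    intro l hl i hi hpre
    have : l = [] := List.eq_nil_of_length_eq_zero (Nat.le_zero.mp hl)
    subst this
    intro hcon
    have h0 : p.drop i = [] := List.prefix_nil.mp hcon
    have := congrArg List.length h0
    simp [List.length_drop] at this
    omega
  | succ n ih =>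
    intro l hl i hi hpre
    cases l with
    | nil =>
      intro hcon
      have h0 : p.drop i = [] := List.prefix_nil.mp hcon
      have := congrArg List.length h0
      simp [List.length_drop] at this
      omega
    | cons c t =>
      cases hf : tbl.find? (fun pr => pr.1.isPrefixOf (c :: t)) with
      | some pr =>
        rw [pvMulti_cons_some hok hf]
        intro hcon
        rcases pv_prefix_append_cases hcon with h1 | h2
        · exact (H pr (List.mem_of_find?_eq_some hf) i hi).1 h1
        · exact (H pr (List.mem_of_find?_eq_some hf) i hi).2 h2
      | none =>
        rw [pvMulti_cons_none hf]
        intro hcon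
        have hd : p.drop i ≠ [] := by
          intro h0
          have := congrArg List.length h0
          simp [List.length_drop] at this
          omega
        obtain ⟨a, q, heq⟩ := List.exists_cons_of_ne_nil hd
        rw [heq] at hcon
        obtain ⟨hac, hq⟩ := List.cons_prefix_cons.mp hcon
        have hq' : q = p.drop (i + 1) := by
          have ht : (p.drop i).tail = p.drop (i + 1) := List.tail_drop
          rw [heq] at ht
          simpa using ht
        by_cases hip : i + 1 < p.length
        · have hnq : ¬ p.drop (i + 1) <+: t := by
            intro hcontra
            apply hpre
            rw [heq, hac]
            exact List.cons_prefix_cons.mpr ⟨rfl, hq' ▸ hcontra⟩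
          exact ih t (by simp at hl; omega) (i + 1) hip hnq (hq' ▸ hq)
        · have hnil : p.drop (i + 1) = [] :=
            List.eq_nil_of_length_eq_zero (by simp [List.length_drop]; omega)
          apply hpre
          rw [heq, hac, hq', hnil]
          exact List.cons_prefix_cons.mpr ⟨rfl, List.nil_prefix⟩

theorem okStep_unpack {tbl : List (List Char × List Char)} {p : List Char}
    (h : okStep tbl p = true) :
    p ≠ [] ∧
    (∀ pr ∈ tbl, ∀ j < pr.2.length, ¬(p <+: pr.2.drop j) ∧ ¬(pr.2.drop j <+: p)) ∧
    (∀ pr ∈ tbl, ∀ i, 0 < i → i < p.length → ¬(pr.1 <+: p.drop i) ∧ ¬(p.drop i <+: pr.1)) ∧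
    (∀ pr ∈ tbl, ∀ i < p.length, ¬(p.drop i <+: pr.2) ∧ ¬(pr.2 <+: p.drop i)) := by
  rw [okStep, Bool.and_eq_true, List.all_eq_true] at h
  obtain ⟨hp, hall⟩ := h
  refine ⟨by simpa [List.isEmpty_iff] using hp, ?_, ?_, ?_⟩
  · intro pr hpr j hj
    have h3 := hall pr hpr
    simp only [Bool.and_eq_true, List.all_eq_true, List.mem_range] at h3
    have := h3.1.1 j hj
    simp only [Bool.not_eq_eq_eq_not, Bool.not_true] at this
    constructor
    · rw [← List.isPrefixOf_iff_prefix, this.1]; simp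
    · rw [← List.isPrefixOf_iff_prefix, this.2]; simp
  · intro pr hpr i hi0 hi
    have h3 := hall pr hpr
    simp only [Bool.and_eq_true, List.all_eq_true, List.mem_range] at h3
    have := h3.1.2 i hi
    simp only [Bool.or_eq_true, decide_eq_true_eq, Bool.and_eq_true,
      Bool.not_eq_eq_eq_not, Bool.not_true] at this
    rcases this with h0 | hh
    · omega
    constructor
    · rw [← List.isPrefixOf_iff_prefix, hh.1]; simp
    · rw [← List.isPrefixOf_iff_prefix, hh.2]; simp
  · intro pr hpr i hi
    have h3 := hall pr hpr
    simp only [Bool.and_eq_true, List.all_eq_true, List.mem_range] at h3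
    have := h3.2 i hi
    simp only [Bool.not_eq_eq_eq_not, Bool.not_true] at this
    constructor
    · rw [← List.isPrefixOf_iff_prefix, this.1]; simp
    · rw [← List.isPrefixOf_iff_prefix, this.2]; simp

theorem pv_find?_append_some {α : Type} {l₁ l₂ : List α} {f : α → Bool} {x : α}
    (h : l₁.find? f = some x) : (l₁ ++ l₂).find? f = some x := by
  induction l₁ with
  | nil => simp at h
  | cons a l ih =>
    by_cases hfa : f a
    · rw [List.find?_cons_of_pos hfa] at h
      rw [List.cons_append, List.find?_cons_of_pos hfa]
      exact h
    · rw [List.find?_cons_of_neg (by simpa using hfa)] at h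
      rw [List.cons_append, List.find?_cons_of_neg (by simpa using hfa)]
      exact ih h

theorem pv_find?_append_none {α : Type} {l₁ l₂ : List α} {f : α → Bool}
    (h : l₁.find? f = none) : (l₁ ++ l₂).find? f = l₂.find? f := by
  induction l₁ with
  | nil => simp
  | cons a l ih =>
    by_cases hfa : f a
    · rw [List.find?_cons_of_pos hfa] at h; simp at h
    · rw [List.find?_cons_of_neg (by simpa using hfa)] at h
      rw [List.cons_append, List.find?_cons_of_neg (by simpa using hfa)]
      exact ih h

theorem pv_step (tbl : List (List Char × List Char)) (p r : List Char)
    (hok : okTbl tbl = true) (hs : okStep tbl p = true) :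
    ∀ (n : Nat) (l : List Char), l.length ≤ n →
      pvRep p r (pvMulti tbl l) = pvMulti (tbl ++ [(p, r)]) l := by
  obtain ⟨hp, H2, H3, H24⟩ := okStep_unpack hs
  have hlen1 : 1 ≤ p.length := by
    cases hpl : p with
    | nil => exact absurd hpl hp
    | cons _ _ => simp
  have hok' : okTbl (tbl ++ [(p, r)]) = true := by
    simp only [okTbl, List.all_eq_true] at hok ⊢
    intro pr hpr
    rcases List.mem_append.mp hpr with hm | hm
    · exact hok pr hm
    · simp at hm
      subst hm
      simpa [List.isEmpty_iff] using hp
  intro n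
  induction n with
  | zero =>
    intro l hl
    have : l = [] := List.eq_nil_of_length_eq_zero (Nat.le_zero.mp hl)
    subst this
    rfl
  | succ n ih =>
    intro l hl
    cases l with
    | nil => rfl
    | cons c t =>
      cases hf : tbl.find? (fun pr => pr.1.isPrefixOf (c :: t)) with
      | some pr =>
        have hmem := List.mem_of_find?_eq_some hf
        have hprne : pr.1 ≠ [] := okTbl_ne hok hmem
        have hprlen : 1 ≤ pr.1.length := by
          cases hpl : pr.1 with
          | nil => exact absurd hpl hprne
          | cons _ _ => simp
        rw [pvMulti_cons_some hok hf]
        rw [pvRep_append p r hp pr.2 (pvMulti tbl ((c :: t).drop pr.1.length))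
          (fun j hj hcon => by
            rcases pv_prefix_append_cases hcon with h1 | h2
            · exact (H2 pr hmem j hj).1 h1
            · exact (H2 pr hmem j hj).2 h2)]
        rw [ih ((c :: t).drop pr.1.length) (by simp [List.length_drop] at *; omega)]
        rw [pvMulti_cons_some hok' (pv_find?_append_some hf)]
      | none =>
        by_cases hpp : p <+: c :: t
        · obtain ⟨rest, hrest⟩ := hpp
          obtain ⟨a, p', rfl⟩ := List.exists_cons_of_ne_nil hp
          have hac : a = c := by
            rw [List.cons_append] at hrest
            exact (List.cons.injEq .. ▸ hrest |> And.left)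
          have ht : t = p' ++ rest := by
            rw [List.cons_append] at hrest
            exact ((List.cons.injEq .. ▸ hrest).2).symm
          rw [pvMulti_cons_none hf, ht]
          rw [pvMulti_append tbl p' rest (fun j hj pr hpr hcon => by
            have h3 := H3 pr hpr (j + 1) (by omega) (by simp; omega)
            simp only [List.drop_succ_cons] at h3
            rcases pv_prefix_append_cases hcon with h1 | h2
            · exact h3.1 h1
            · exact h3.2 h2)]
          subst hac
          rw [pvRep_cons _ _ hp,
            if_pos (by
              rw [List.isPrefixOf_iff_prefix]
              exact List.cons_prefix_cons.mpr ⟨rfl, List.prefix_append _ _⟩)]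
          simp only [List.length_cons, List.drop_succ_cons, List.drop_left]
          have hrl : rest.length ≤ n := by
            have := congrArg List.length hrest
            simp at this hl
            omega
          rw [ih rest hrl]
          rw [ht] at hf
          have hfind : (tbl ++ [(a :: p', r)]).find? (fun pr => pr.1.isPrefixOf (a :: (p' ++ rest))) = some (a :: p', r) := by
            rw [pv_find?_append_none hf]
            rw [List.find?_cons_of_pos]
            rw [List.isPrefixOf_iff_prefix]
            exact ⟨rest, by simp⟩
          rw [pvMulti_cons_some hok' hfind]
          have hdrop : (a :: (p' ++ rest)).drop (a :: p').length = rest := by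
            simp
          rw [hdrop]
        · rw [pvMulti_cons_none hf]
          have hnm : ¬ p <+: c :: pvMulti tbl t := by
            have h0 : ¬ p.drop 0 <+: c :: t := by simpa using hpp
            have := pv_no_new tbl p hok H24 (n + 1) (c :: t) hl 0 (by omega) h0
            rw [pvMulti_cons_none hf] at this
            simpa using this
          rw [pvRep_cons _ _ hp,
            if_neg (by rw [List.isPrefixOf_iff_prefix]; simpa using hnm)]
          rw [ih t (by simp at hl; omega)]
          have hfind : (tbl ++ [(p, r)]).find? (fun pr => pr.1.isPrefixOf (c :: t)) = none := by
            rw [pv_find?_append_none hf]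
            rw [List.find?_cons_of_neg (by rw [List.isPrefixOf_iff_prefix]; simpa using hpp)]
            rfl
          rw [pvMulti_cons_none hfind]

theorem pv_seq_multi :
    ∀ (rest tbl : List (List Char × List Char)), okTbl tbl = true → okAllFrom tbl rest = true →
      ∀ l : List Char,
        rest.foldl (fun l pr => pvRep pr.1 pr.2 l) (pvMulti tbl l) = pvMulti (tbl ++ rest) l := by
  intro rest
  induction rest with
  | nil => intro tbl _ _ l; simp
  | cons pr rest ih =>
    intro tbl hok hall l
    rw [okAllFrom, Bool.and_eq_true] at hall
    obtain ⟨hstep, hall'⟩ := hall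
    have hok' : okTbl (tbl ++ [pr]) = true := by
      simp only [okTbl, List.all_eq_true] at hok ⊢
      intro q hq
      rcases List.mem_append.mp hq with hm | hm
      · exact hok q hm
      · simp at hm
        subst hm
        simpa [List.isEmpty_iff] using (okStep_unpack hstep).1
    simp only [List.foldl_cons]
    have hone : pvRep pr.1 pr.2 (pvMulti tbl l) = pvMulti (tbl ++ [pr]) l := by
      have := pv_step tbl pr.1 pr.2 hok hstep l.length l le_rfl
      simpa using this
    rw [hone, ih (tbl ++ [pr]) hok' hall' l]
    simp

def pvRepStep3 (l h : List Char) : List Char :=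
  pvRep (pvTitleChars h ++ [':']) ('\n' :: (h ++ [':', '\n']))
    (pvRep (PySem.Chars.lower h ++ [':']) ('\n' :: (h ++ [':', '\n']))
      (pvRep (h ++ [':']) ('\n' :: (h ++ [':', '\n'])) l))

theorem pv_A_fold_eq : ∀ (hs : List (List Char)) (l : List Char),
    hs.foldl (fun doc h =>
      let doc := PySem.Chars.replace doc (h ++ [':']) ('\n' :: (h ++ [':', '\n']))
      let doc := PySem.Chars.replace doc (PySem.Chars.lower h ++ [':']) ('\n' :: (h ++ [':', '\n']))
      PySem.Chars.replace doc (pvTitleChars h ++ [':']) ('\n' :: (h ++ [':', '\n']))) l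
    = hs.foldl pvRepStep3 l := by
  intro hs
  induction hs with
  | nil => intro l; rfl
  | cons h hs ih =>
    intro l
    simp only [List.foldl_cons]
    rw [ih]
    congr 1
    show PySem.Chars.replace
        (PySem.Chars.replace (PySem.Chars.replace l (h ++ [':']) ('\n' :: (h ++ [':', '\n'])))
          (PySem.Chars.lower h ++ [':']) ('\n' :: (h ++ [':', '\n'])))
        (pvTitleChars h ++ [':']) ('\n' :: (h ++ [':', '\n'])) = pvRepStep3 l h
    rw [pv_replace_eq _ _ _ (by simp), pv_replace_eq _ _ _ (by simp), pv_replace_eq _ _ _ (by simp)]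
    rfl

theorem pv_build_seq : ∀ (hs : List (List Char)) (tbl : List (List Char × List Char)) (l : List Char),
    seqRep (hs.foldl (fun tbl h =>
      tbl ++ [(h ++ [':'], '\n' :: (h ++ [':', '\n'])),
              (PySem.Chars.lower h ++ [':'], '\n' :: (h ++ [':', '\n'])),
              (pvTitleChars h ++ [':'], '\n' :: (h ++ [':', '\n']))]) tbl) l
    = hs.foldl pvRepStep3 (seqRep tbl l) := by
  intro hs
  induction hs with
  | nil => intro tbl l; rfl
  | cons h hs ih =>
    intro tbl l
    simp only [List.foldl_cons]
    rw [ih]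
    congr 1
    simp [seqRep, List.foldl_append, pvRepStep3]

theorem pv_main (l : List Char) : seqRep pvTable l = pvMulti pvTable l := by
  have h := pv_seq_multi pvTable [] rfl (by decide) l
  rw [pvMulti_nil_tbl l] at h
  simpa [seqRep] using h

-- ===== VERDICT (by name: the statement is the Claim_ definition above) =====
theorem format_section_headers_py_spec : Claim_equal_format_section_headers_py := by
  intro doc _
  unfold Spec_format_section_headers_py
  have hA : format_section_headers_py doc = String.ofList (seqRep pvTable doc.toList) := by
    rw [format_section_headers_py, pv_A_fold_eq]
    have := pv_build_seq pvHeaders [] doc.toList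
    rw [pvTable, this]
    rfl
  rw [hA, pv_main]
  rfl
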